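-- pv_equiv track=rewrite | github.com/ealia28/Abakaev-web-dev-2024-1 | happiness.py | calculate_mood
-- ===== SOURCE A (Python) =====
-- def calculate_mood(n, m, arr, A, B):
--     mood = 0
--     set_A = set(A)
--     set_B = set(B)
--
--     for num in arr:
--         if num in set_A:
--             mood += 1
--         elif num in set_B:
--             mood -= 1
--
--     return mood
-- ===== SOURCE B (Python) =====
-- def calculate_mood(n, m, arr, A, B):
--     # Build a frequency table of the stream once, then score by iterating
--     # over the membership sets instead of over arr.
--     counts = {}
--     for x in arr:
--         counts[x] = counts.get(x, 0) + 1
--     set_A = set(A)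
--     set_B = set(B)
--     pos = sum(counts.get(x, 0) for x in set_A)
--     neg = sum(counts.get(x, 0) for x in set_B if x not in set_A)
--     return pos - neg
-- ===== Notes on version B (the rewrite author's own statement) =====
-- stated objective: alternative
-- what changed: B builds a frequency table of arr once and then sums counts over set A and over set B minus A, instead of a single pass over arr with per-element membership branching.
import Mathlib
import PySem

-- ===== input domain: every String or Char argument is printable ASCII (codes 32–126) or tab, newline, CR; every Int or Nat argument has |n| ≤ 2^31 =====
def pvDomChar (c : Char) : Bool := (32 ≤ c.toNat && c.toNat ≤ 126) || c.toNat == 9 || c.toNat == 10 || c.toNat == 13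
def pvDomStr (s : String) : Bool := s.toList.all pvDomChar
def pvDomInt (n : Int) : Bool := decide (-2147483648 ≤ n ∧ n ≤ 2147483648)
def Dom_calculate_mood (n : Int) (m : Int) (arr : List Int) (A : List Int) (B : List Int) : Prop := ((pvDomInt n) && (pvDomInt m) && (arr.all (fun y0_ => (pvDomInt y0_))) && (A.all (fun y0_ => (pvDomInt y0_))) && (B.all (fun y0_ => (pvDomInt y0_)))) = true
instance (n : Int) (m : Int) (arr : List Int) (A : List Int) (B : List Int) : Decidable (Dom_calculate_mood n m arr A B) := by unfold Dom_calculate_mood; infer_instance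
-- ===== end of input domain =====

-- B replaces A's single branching pass over arr by a frequency table of arr
-- scored by a pass over the two membership sets (alternative decomposition, same cost).

-- ===== PORT A =====
def calculate_mood (n : Int) (m : Int) (arr : List Int) (A : List Int) (B : List Int) : Int :=
  let set_A := PySem.Set.ofList A
  let set_B := PySem.Set.ofList B
  arr.foldl (fun mood num =>
    if PySem.Set.contains set_A num then mood + 1
    else if PySem.Set.contains set_B num then mood - 1
    else mood) 0

-- ===== PORT B =====
def calculate_mood_alt (n : Int) (m : Int) (arr : List Int) (A : List Int) (B : List Int) : Int :=
  let counts : PySem.Dict Int Int :=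
    arr.foldl (fun d x => d.insert x (d.getD x 0 + 1)) PySem.Dict.empty
  let set_A := PySem.Set.ofList A
  let set_B := PySem.Set.ofList B
  let pos := (set_A.map (fun x => counts.getD x 0)).sum
  let neg := ((set_B.filter (fun x => !PySem.Set.contains set_A x)).map
      (fun x => counts.getD x 0)).sum
  pos - neg

-- ===== PRECONDITION & SPEC =====
def Spec_calculate_mood (n : Int) (m : Int) (arr : List Int) (A : List Int) (B : List Int) (out : Int) : Prop := out = calculate_mood_alt n m arr A B
instance (n : Int) (m : Int) (arr : List Int) (A : List Int) (B : List Int) (out : Int) : Decidable (Spec_calculate_mood n m arr A B out) := by unfold Spec_calculate_mood; infer_instance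

-- ===== CLAIM (what is proved, stated in full; the proofs are below) =====
def Claim_equal_calculate_mood : Prop := ∀ (n : Int) (m : Int) (arr : List Int) (A : List Int) (B : List Int), Dom_calculate_mood n m arr A B → Spec_calculate_mood n m arr A B (calculate_mood n m arr A B)

-- ===== LEMMAS AND PROOFS =====

-- Sum of the indicator (x == y) over a duplicate-free list is the membership indicator.
theorem sum_indicator_of_nodup (l : List Int) (hl : l.Nodup) (y : Int) :
    (l.map (fun x => if x == y then (1 : Int) else 0)).sum
      = (if l.contains y then (1 : Int) else 0) := by
  induction l with
  | nil => simp
  | cons a t ih =>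
    rcases List.nodup_cons.mp hl with ⟨ha, ht⟩
    simp only [List.map_cons, List.sum_cons, ih ht, List.contains_cons]
    rcases eq_or_ne a y with rfl | hay
    · simp [List.contains_eq_mem, ha]
    · simp [List.contains_eq_mem, hay, hay.symm]

-- Sum of counts of (y :: arr) over a duplicate-free list.
theorem sum_count_cons (l : List Int) (hl : l.Nodup) (y : Int) (arr : List Int) :
    (l.map (fun x => ((y :: arr).count x : Int))).sum
      = (l.map (fun x => (arr.count x : Int))).sum + (if l.contains y then (1 : Int) else 0) := by
  have h : ∀ x : Int, ((y :: arr).count x : Int)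
      = (arr.count x : Int) + (if x == y then (1 : Int) else 0) := by
    intro x
    rcases eq_or_ne x y with rfl | hxy
    · simp
    · simp [hxy, hxy.symm]
  calc (l.map (fun x => ((y :: arr).count x : Int))).sum
      = (l.map (fun x => (arr.count x : Int) + (if x == y then (1 : Int) else 0))).sum := by
        simp only [h]
    _ = (l.map (fun x => (arr.count x : Int))).sum
        + (l.map (fun x => if x == y then (1 : Int) else 0)).sum := by
        rw [← List.sum_map_add]
    _ = _ := by rw [sum_indicator_of_nodup l hl y]

-- Core loop invariant: A's fold equals acc + (sum of counts over sA) − (sum over sB \ sA).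
theorem fold_eq_counts (sA sB : List Int) (hA : sA.Nodup) (hB : sB.Nodup) (arr : List Int) :
    ∀ (acc : Int),
    arr.foldl (fun mood num =>
        if PySem.Set.contains sA num then mood + 1
        else if PySem.Set.contains sB num then mood - 1
        else mood) acc
      = acc + (sA.map (fun x => (arr.count x : Int))).sum
        - ((sB.filter (fun x => !PySem.Set.contains sA x)).map (fun x => (arr.count x : Int))).sum := by
  simp only [PySem.Set.contains]
  induction arr with
  | nil => intro acc; simp
  | cons y t ih =>
    intro acc
    have hBf : (sB.filter (fun x => !sA.contains x)).Nodup := hB.filter _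
    have hmem : (sB.filter (fun x => !sA.contains x)).contains y
        = (sB.contains y && !sA.contains y) := by
      by_cases h1 : y ∈ sB <;> by_cases h2 : y ∈ sA <;>
        simp [List.contains_eq_mem, List.mem_filter, h1, h2]
    rw [List.foldl_cons, ih]
    rw [sum_count_cons sA hA y t, sum_count_cons _ hBf y t, hmem]
    by_cases h2 : y ∈ sA
    · simp only [List.contains_eq_mem, h2, decide_true, if_pos, Bool.not_true, Bool.and_false,
        Bool.false_eq_true, if_false]
      ring
    · by_cases h1 : y ∈ sB
      · simp only [List.contains_eq_mem, h2, h1, decide_true, decide_false, Bool.false_eq_true,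
          if_false, Bool.not_false, Bool.and_true, if_true]
        ring
      · simp only [List.contains_eq_mem, h2, h1, decide_false, Bool.false_eq_true, if_false,
          Bool.not_false, Bool.and_true]
        ring

-- The counter built by B returns arr.count.
theorem counts_getD (arr : List Int) (v : Int) :
    (arr.foldl (fun d x => d.insert x (d.getD x 0 + 1)) (PySem.Dict.empty : PySem.Dict Int Int)).getD v 0
      = (arr.count v : Int) := by
  rw [PySem.Dict.getD_foldl_insert_add_one]
  simp [PySem.Dict.empty, PySem.Dict.getD, PySem.Dict.get?]

-- ===== VERDICT (by name: the statement is the Claim_ definition above) =====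
theorem calculate_mood_spec : Claim_equal_calculate_mood := by
  intro n m arr A B _
  unfold Spec_calculate_mood calculate_mood calculate_mood_alt
  simp only [counts_getD]
  rw [fold_eq_counts (PySem.Set.ofList A) (PySem.Set.ofList B)
      (PySem.Set.nodup_ofList A) (PySem.Set.nodup_ofList B) arr 0]
  ring
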